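-- pv_equiv track=rewrite | github.com/NWChemEx-Project/DeveloperTools | scripts/make_tutorials.py | write_comment
-- ===== SOURCE A (Python) =====
-- def write_comment(block):
--     start = 0
--     end = len(block)
--
--     # Strip off any proceeding or trailing blank lines
--     for line in block:
--         if line.strip():
--             break
--         start += 1
--
--     if start == end:  # Early termination for blank blocks
--         return ""
--
--     for line in reversed(block):
--         if line.strip():
--             break
--         end -= 1
--
--     output = ""
--     for line in block[start : end]:
--         output += line
--     output += '\n'
--     return output
-- ===== SOURCE B (Python) =====
-- def write_comment(block):
--     idx = [i for i, l in enumerate(block) if l.strip()]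
--     if not idx:
--         return ""
--     return ''.join(block[idx[0]:idx[-1] + 1]) + '\n'
-- ===== Notes on version B (the rewrite author's own statement) =====
-- stated objective: simpler
-- what changed: One enumerate pass collects the indices of non-blank lines; the trim boundaries are read off as idx[0] and idx[-1]+1 and the slice is joined, replacing A's forward scan, separate reversed scan and += accumulation loop.
import Mathlib
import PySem

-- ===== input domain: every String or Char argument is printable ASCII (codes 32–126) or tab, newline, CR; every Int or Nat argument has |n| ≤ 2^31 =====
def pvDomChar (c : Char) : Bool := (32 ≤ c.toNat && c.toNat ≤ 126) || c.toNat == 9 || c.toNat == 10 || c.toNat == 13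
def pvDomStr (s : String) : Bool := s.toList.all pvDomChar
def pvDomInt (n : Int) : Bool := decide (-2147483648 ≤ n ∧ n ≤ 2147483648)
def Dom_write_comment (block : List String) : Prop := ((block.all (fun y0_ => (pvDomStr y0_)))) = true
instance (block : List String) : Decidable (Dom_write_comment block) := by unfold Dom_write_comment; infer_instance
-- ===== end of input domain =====

-- B replaces A's forward scan + reversed scan + "+=" accumulation by one enumerate pass
-- collecting the indices of non-blank lines, then slicing between idx[0] and idx[-1]+1 and joining (simpler decomposition; return value only).


-- ===== PORT A =====
-- A's first loop: 'for line in block: if line.strip(): break; start += 1'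
def pvLeadBlanks : List String → Nat
  | [] => 0
  | l :: ls => if PySem.Str.strip l == "" then pvLeadBlanks ls + 1 else 0

def write_comment (block : List String) : String :=
  let start := pvLeadBlanks block
  let «end» := block.length
  if start = «end» then ""
  else
    -- second loop over reversed(block) decrementing end
    let «end» := «end» - pvLeadBlanks block.reverse
    -- 'output = ""; for line in block[start:end]: output += line'
    let output := (PySem.List.slice block (some (start : Int)) (some («end» : Int))).foldl
      (fun acc line => acc ++ line) ""
    output ++ "\n"

-- ===== PORT B =====
def write_comment_alt (block : List String) : String :=
  match ((PySem.List.enumerate block).filter (fun p => !(PySem.Str.strip p.2 == ""))).map (·.1) with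
  | [] => ""
  | i :: rest =>
    -- idx[-1] on the known-nonempty idx = (i :: rest).getLast!
    PySem.Str.join "" (PySem.List.slice block (some i) (some ((i :: rest).getLast! + 1))) ++ "\n"

-- ===== PRECONDITION & SPEC =====
def Spec_write_comment (block : List String) (out : String) : Prop := out = write_comment_alt block
instance (block : List String) (out : String) : Decidable (Spec_write_comment block out) := by unfold Spec_write_comment; infer_instance

-- ===== CLAIM (what is proved, stated in full; the proofs are below) =====
def Claim_equal_write_comment : Prop := ∀ (block : List String), Dom_write_comment block → Spec_write_comment block (write_comment block)

-- ===== LEMMAS AND PROOFS =====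

-- index list of B, generalized over the enumerate start
def pvIdx (s : Int) (l : List String) : List Int :=
  ((PySem.List.enumerate l s).filter (fun p => !(PySem.Str.strip p.2 == ""))).map (·.1)

lemma pvIdx_nil (s : Int) : pvIdx s [] = [] := by
  simp [pvIdx, PySem.List.enumerate_nil]

lemma pvIdx_cons (s : Int) (x : String) (xs : List String) :
    pvIdx s (x :: xs) =
      if PySem.Str.strip x == "" then pvIdx (s + 1) xs else s :: pvIdx (s + 1) xs := by
  simp only [pvIdx, PySem.List.enumerate_cons, List.filter_cons]
  split_ifs with h <;> simp_all

lemma pvIdx_append (s : Int) (l : List String) (x : String) :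
    pvIdx s (l ++ [x]) =
      if PySem.Str.strip x == "" then pvIdx s l else pvIdx s l ++ [s + l.length] := by
  simp only [pvIdx, PySem.List.enumerate_append, List.filter_append, List.map_append,
    PySem.List.enumerate_cons, PySem.List.enumerate_nil, List.filter_cons]
  split_ifs with h <;> simp_all

lemma pvIdx_eq_nil_iff (s : Int) (l : List String) :
    pvIdx s l = [] ↔ ∀ x ∈ l, PySem.Str.strip x == "" := by
  induction l generalizing s with
  | nil => simp [pvIdx_nil]
  | cons x xs ih =>
    rw [pvIdx_cons]
    split_ifs with h <;> simp_all

lemma pvLead_le (l : List String) : pvLeadBlanks l ≤ l.length := by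
  induction l with
  | nil => simp [pvLeadBlanks]
  | cons x xs ih => simp only [pvLeadBlanks, List.length_cons]; split_ifs <;> omega

lemma pvLead_eq_len_iff (l : List String) :
    pvLeadBlanks l = l.length ↔ ∀ x ∈ l, PySem.Str.strip x == "" := by
  induction l with
  | nil => simp [pvLeadBlanks]
  | cons x xs ih =>
    simp only [pvLeadBlanks, List.length_cons, List.mem_cons]
    split_ifs with h
    · constructor
      · intro he y hy
        rcases hy with rfl | hy
        · exact h
        · exact (ih.1 (by omega)) y hy
      · intro hall
        have := ih.2 (fun y hy => hall y (Or.inr hy))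
        omega
    · constructor
      · intro h0
        exact h0.elim
      · intro hall
        exact absurd (hall x (Or.inl rfl)) (by simpa using h)

lemma pv_not_all_tail {x : String} {xs : List String}
    (hx : (PySem.Str.strip x == "") = true)
    (h : ¬ ∀ y ∈ x :: xs, PySem.Str.strip y == "") :
    ¬ ∀ y ∈ xs, PySem.Str.strip y == "" := by
  intro hall
  apply h
  intro y hy
  rcases List.mem_cons.1 hy with rfl | hy
  · exact hx
  · exact hall y hy

lemma pv_not_all_front {x : String} {xs : List String}
    (hx : (PySem.Str.strip x == "") = true)
    (h : ¬ ∀ y ∈ xs ++ [x], PySem.Str.strip y == "") :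
    ¬ ∀ y ∈ xs, PySem.Str.strip y == "" := by
  intro hall
  apply h
  intro y hy
  rcases List.mem_append.1 hy with hy | hy
  · exact hall y hy
  · simp only [List.mem_singleton] at hy
    subst hy
    exact hx

-- head of the index list = start = number of leading blanks
lemma pvIdx_head (s : Int) (l : List String) (h : ¬ ∀ x ∈ l, PySem.Str.strip x == "") :
    ∃ rest, pvIdx s l = (s + (pvLeadBlanks l : Int)) :: rest := by
  induction l generalizing s with
  | nil => simp at h
  | cons x xs ih =>
    rw [pvIdx_cons]
    by_cases hx : (PySem.Str.strip x == "") = true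
    · obtain ⟨rest, hr⟩ := ih (s + 1) (pv_not_all_tail hx h)
      refine ⟨rest, ?_⟩
      rw [if_pos hx, hr]
      have : pvLeadBlanks (x :: xs) = pvLeadBlanks xs + 1 := by
        simp [pvLeadBlanks, hx]
      rw [this]
      congr 1
      push_cast
      ring
    · refine ⟨pvIdx (s + 1) xs, ?_⟩
      rw [if_neg hx]
      have : pvLeadBlanks (x :: xs) = 0 := by
        simp only [pvLeadBlanks]
        rw [if_neg hx]
      rw [this]
      simp

-- last of the index list: s + len - 1 - (number of trailing blanks)
lemma pvIdx_last (s : Int) (l : List String) (h : ¬ ∀ x ∈ l, PySem.Str.strip x == "") :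
    ∃ front, pvIdx s l = front ++ [s + (l.length : Int) - 1 - (pvLeadBlanks l.reverse : Int)] := by
  induction l using List.reverseRecOn generalizing s with
  | nil => simp at h
  | append_singleton xs x ih =>
    rw [pvIdx_append]
    have hrev : (xs ++ [x]).reverse = x :: xs.reverse := by simp
    by_cases hx : (PySem.Str.strip x == "") = true
    · obtain ⟨front, hf⟩ := ih s (pv_not_all_front hx h)
      refine ⟨front, ?_⟩
      rw [if_pos hx, hf, hrev]
      have hl : pvLeadBlanks (x :: xs.reverse) = pvLeadBlanks xs.reverse + 1 := by
        simp [pvLeadBlanks, hx]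
      rw [hl]
      congr 2
      simp only [List.length_append, List.length_cons, List.length_nil]
      push_cast
      ring
    · refine ⟨pvIdx s xs, ?_⟩
      rw [if_neg hx, hrev]
      have hl : pvLeadBlanks (x :: xs.reverse) = 0 := by
        simp only [pvLeadBlanks]
        rw [if_neg hx]
      rw [hl]
      congr 2
      simp only [List.length_append, List.length_cons, List.length_nil]
      push_cast
      ring

lemma foldl_append_toList (l : List String) (a : String) :
    (l.foldl (fun acc s => acc ++ s) a).toList = a.toList ++ (l.map String.toList).flatten := by
  induction l generalizing a with
  | nil => simp
  | cons x xs ih => simp [List.foldl_cons, ih, List.append_assoc]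

lemma join_empty_toList (l : List String) :
    (PySem.Str.join "" l).toList = (l.map String.toList).flatten := by
  rw [PySem.Str.toList_join]
  show PySem.Chars.join [] _ = _
  simp [PySem.Chars.join, List.intercalate]
  induction (l.map String.toList) with
  | nil => simp
  | cons y ys ih => cases ys <;> simp_all [List.intersperse]

-- ===== VERDICT (by name: the statement is the Claim_ definition above) =====
theorem write_comment_spec : Claim_equal_write_comment := by
  intro block _
  unfold Spec_write_comment write_comment write_comment_alt
  have hidx : ((PySem.List.enumerate block).filter (fun p => !(PySem.Str.strip p.2 == ""))).map (·.1)
      = pvIdx 0 block := rfl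
  by_cases hall : ∀ x ∈ block, PySem.Str.strip x == ""
  · have h1 : pvLeadBlanks block = block.length := (pvLead_eq_len_iff block).2 hall
    have h2 : pvIdx 0 block = [] := (pvIdx_eq_nil_iff 0 block).2 hall
    rw [hidx, h2]
    simp [h1]
  · have h1 : pvLeadBlanks block ≠ block.length := fun h => hall ((pvLead_eq_len_iff block).1 h)
    obtain ⟨rest, hhead⟩ := pvIdx_head 0 block hall
    obtain ⟨front, hlast⟩ := pvIdx_last 0 block hall
    have g? : (pvIdx 0 block).getLast?
        = some (0 + (block.length : Int) - 1 - (pvLeadBlanks block.reverse : Int)) := by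
      rw [hlast]
      exact List.getLast?_concat
    rw [hhead] at g?
    have hlast! : ((0 + (pvLeadBlanks block : Int)) :: rest).getLast!
        = 0 + (block.length : Int) - 1 - (pvLeadBlanks block.reverse : Int) := by
      exact List.getLast!_of_getLast? g?
    rw [hidx, hhead, if_neg h1]
    simp only [hlast!]
    have hcle : pvLeadBlanks block.reverse ≤ block.length := by
      have := pvLead_le block.reverse
      simpa using this
    have hb : (0 : Int) + (block.length : Int) - 1 - (pvLeadBlanks block.reverse : Int) + 1
        = ((block.length - pvLeadBlanks block.reverse : Nat) : Int) := by
      push_cast [hcle]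
      ring
    have hs : (0 : Int) + (pvLeadBlanks block : Int) = ((pvLeadBlanks block : Nat) : Int) := by
      ring
    rw [hb, hs]
    apply congrArg (fun s => s ++ "\n")
    apply String.toList_inj.1
    rw [foldl_append_toList, join_empty_toList]
    simp
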